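-- pv_equiv track=rewrite | github.com/EloviGit/CardinalityEstimation | newsimu.py | ArtifCodebook393
-- ===== SOURCE A (Python) =====
-- Infty = 32 # to us, values above 32 is a state not possible to appear in LL simulation. in simulation not even 16
--
-- def ArtifCodebook393(ptriple):
--     # 394 states, one of them is inf, inf, inf, excluded when counting sizes
--     # (-2, -1, 0, 1, 2, 4)
--     # 6*6*6 + 3*7*7+3*9+1
--     newtripl = [0, 0, 0]
--     infN = 0
--     CoDict0 = {-1:-1, 0:0, 1:1, 2:2, 3:4, 4:4}
--     CoDict1 = {-1:-1, 0:0, 1:1, 2:2, 3:4, 4:4, 5:6, 6:6}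
--     CoDict2 = {-1:-1, 0:0, 1:1, 2:2, 3:3, 4:4, 5:5, 6:6, 7:7}
--     for l in range(3):
--         if ptriple[l] <= -2:
--             newtripl[l] = -2
--         elif -1<=ptriple[l]<=4:
--             newtripl[l] = CoDict0[ptriple[l]]
--         else:
--             newtripl[l] = Infty
--             infN += 1
--
--     if infN == 1:
--         for l in range(3):
--             if ptriple[l] <= -2:
--                 newtripl[l] = -2
--             elif -1 <= ptriple[l] <= 6:
--                 newtripl[l] = CoDict1[ptriple[l]]
--             else:
--                 newtripl[l] = Infty
--     elif infN == 2:
--         for l in range(3):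
--             if ptriple[l] <= -2:
--                 newtripl[l] = -2
--             elif -1 <= ptriple[l] <= 7:
--                 newtripl[l] = CoDict2[ptriple[l]]
--             else:
--                 newtripl[l] = Infty
--
--     changed = newtripl[0] == ptriple[0] and newtripl[1] == ptriple[1] and newtripl[2] == ptriple[2]
--     return tuple(newtripl), changed
-- ===== SOURCE B (Python) =====
-- # Table-driven, recursive quantizer: clamp each value into a single TOTAL codebook
-- # (which already contains the -2 floor and the Infty ceiling as ordinary entries),
-- # and fold the result tuple and the 'changed' flag in one recursive pass.
-- _T0 = ({-2: -2, -1: -1, 0: 0, 1: 1, 2: 2, 3: 4, 4: 4, 5: 32}, 5)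
-- _T1 = ({-2: -2, -1: -1, 0: 0, 1: 1, 2: 2, 3: 4, 4: 4, 5: 6, 6: 6, 7: 32}, 7)
-- _T2 = ({-2: -2, -1: -1, 0: 0, 1: 1, 2: 2, 3: 3, 4: 4, 5: 5, 6: 6, 7: 7, 8: 32}, 8)
--
--
-- def _go(xs, T, hi):
--     if not xs:
--         return [], True
--     rest, ok = _go(xs[1:], T, hi)
--     y = T[min(max(xs[0], -2), hi)]
--     return [y] + rest, ok and y == xs[0]
--
--
-- def ArtifCodebook393(ptriple):
--     xs = [ptriple[0], ptriple[1], ptriple[2]]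
--     infN = sum(1 for x in xs if x >= 5)
--     T, hi = _T1 if infN == 1 else _T2 if infN == 2 else _T0
--     new, ok = _go(xs, T, hi)
--     return (new[0], new[1], new[2]), ok
-- ===== Notes on version B (the rewrite author's own statement) =====
-- stated objective: alternative
-- what changed: Replaces A's compute-then-conditionally-recompute pair of index loops over three partial codebook dicts by selecting one TOTAL clamp-table (the -2 floor and the Infty ceiling are ordinary table entries), then one recursive pass that simultaneously builds the quantized list back-to-front and folds the 'changed' flag.
import Mathlib
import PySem

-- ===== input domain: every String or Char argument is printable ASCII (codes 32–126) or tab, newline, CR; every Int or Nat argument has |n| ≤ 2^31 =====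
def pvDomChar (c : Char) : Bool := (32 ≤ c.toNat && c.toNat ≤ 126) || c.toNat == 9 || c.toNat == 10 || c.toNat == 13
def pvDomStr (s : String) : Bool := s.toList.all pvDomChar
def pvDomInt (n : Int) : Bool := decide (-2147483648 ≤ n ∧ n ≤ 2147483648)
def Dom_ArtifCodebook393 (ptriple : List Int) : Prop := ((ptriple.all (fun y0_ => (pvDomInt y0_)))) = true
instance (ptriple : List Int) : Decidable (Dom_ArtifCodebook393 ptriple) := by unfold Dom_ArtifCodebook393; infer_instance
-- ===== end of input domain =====

-- B replaces A's staged branch-and-dict loops by one total clamp-table per infN and a single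
-- recursive pass building the result and the 'changed' flag together; objective: alternative.


-- ===== PORT A =====
def pvCoDict0 : PySem.Dict Int Int := PySem.Dict.ofList [(-1,-1),(0,0),(1,1),(2,2),(3,4),(4,4)]
def pvCoDict1 : PySem.Dict Int Int := PySem.Dict.ofList [(-1,-1),(0,0),(1,1),(2,2),(3,4),(4,4),(5,6),(6,6)]
def pvCoDict2 : PySem.Dict Int Int := PySem.Dict.ofList [(-1,-1),(0,0),(1,1),(2,2),(3,3),(4,4),(5,5),(6,6),(7,7)]

def ArtifCodebook393 (ptriple : List Int) : (Int × Int × Int) × Bool :=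
  -- first loop: fills newtripl with CoDict0 quantization and counts infN
  let st := (PySem.List.pyRange 0 3 1).foldl (fun (st : List Int × Int) l =>
      let x := (PySem.List.pyGet? ptriple l).getD 0   -- some _ whenever Pre_ holds (3 ≤ length)
      if x ≤ -2 then (st.1.set l.toNat (-2), st.2)
      else if -1 ≤ x ∧ x ≤ 4 then (st.1.set l.toNat ((PySem.Dict.get? pvCoDict0 x).getD 0), st.2)
      else (st.1.set l.toNat 32, st.2 + 1)) ([0, 0, 0], (0 : Int))
  let infN := st.2
  -- conditional second loop, overwriting newtripl
  let newtripl :=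
    if infN = 1 then
      (PySem.List.pyRange 0 3 1).foldl (fun (nt : List Int) l =>
        let x := (PySem.List.pyGet? ptriple l).getD 0
        if x ≤ -2 then nt.set l.toNat (-2)
        else if -1 ≤ x ∧ x ≤ 6 then nt.set l.toNat ((PySem.Dict.get? pvCoDict1 x).getD 0)
        else nt.set l.toNat 32) st.1
    else if infN = 2 then
      (PySem.List.pyRange 0 3 1).foldl (fun (nt : List Int) l =>
        let x := (PySem.List.pyGet? ptriple l).getD 0
        if x ≤ -2 then nt.set l.toNat (-2)
        else if -1 ≤ x ∧ x ≤ 7 then nt.set l.toNat ((PySem.Dict.get? pvCoDict2 x).getD 0)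
        else nt.set l.toNat 32) st.1
    else st.1
  let g := fun (i : Int) => (PySem.List.pyGet? newtripl i).getD 0
  let p := fun (i : Int) => (PySem.List.pyGet? ptriple i).getD 0
  let changed := decide (g 0 = p 0) && decide (g 1 = p 1) && decide (g 2 = p 2)
  ((g 0, g 1, g 2), changed)

-- ===== PORT B =====
-- total clamp-tables _T0/_T1/_T2 of Source B, with their clamp ceilings
def pvT0 : PySem.Dict Int Int := PySem.Dict.ofList [(-2,-2),(-1,-1),(0,0),(1,1),(2,2),(3,4),(4,4),(5,32)]
def pvT1 : PySem.Dict Int Int := PySem.Dict.ofList [(-2,-2),(-1,-1),(0,0),(1,1),(2,2),(3,4),(4,4),(5,6),(6,6),(7,32)]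
def pvT2 : PySem.Dict Int Int := PySem.Dict.ofList [(-2,-2),(-1,-1),(0,0),(1,1),(2,2),(3,3),(4,4),(5,5),(6,6),(7,7),(8,32)]

-- _go of Source B: recursive pass building the quantized list and folding the 'changed' flag
def pvGo (xs : List Int) (T : PySem.Dict Int Int) (hi : Int) : List Int × Bool :=
  match xs with
  | [] => ([], true)
  | x :: tail =>
    let r := pvGo tail T hi
    let y := (PySem.Dict.get? T (min (max x (-2)) hi)).getD 0  -- key always present: clamped into table range
    (y :: r.1, r.2 && decide (y = x))

def ArtifCodebook393_alt (ptriple : List Int) : (Int × Int × Int) × Bool :=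
  let xs : List Int := [(PySem.List.pyGet? ptriple 0).getD 0,   -- some _ whenever Pre_ holds
                        (PySem.List.pyGet? ptriple 1).getD 0,
                        (PySem.List.pyGet? ptriple 2).getD 0]
  let infN : Int := (xs.filter (fun x => 5 ≤ x)).length
  let Thi := if infN = 1 then (pvT1, (7 : Int)) else if infN = 2 then (pvT2, (8 : Int)) else (pvT0, (5 : Int))
  let res := pvGo xs Thi.1 Thi.2
  (((PySem.List.pyGet? res.1 0).getD 0, (PySem.List.pyGet? res.1 1).getD 0, (PySem.List.pyGet? res.1 2).getD 0), res.2)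

-- ===== PRECONDITION & SPEC =====
-- Pre_ excludes exactly the inputs where A raises IndexError: lists with fewer than 3 elements.
def Pre_ArtifCodebook393 (ptriple : List Int) : Prop := 3 ≤ ptriple.length
instance (ptriple : List Int) : Decidable (Pre_ArtifCodebook393 ptriple) := by unfold Pre_ArtifCodebook393; infer_instance
def pvWitness_ArtifCodebook393 : List Int := [1, 5, -3]

def Spec_ArtifCodebook393 (ptriple : List Int) (out : (Int × Int × Int) × Bool) : Prop := out = ArtifCodebook393_alt ptriple
instance (ptriple : List Int) (out : (Int × Int × Int) × Bool) : Decidable (Spec_ArtifCodebook393 ptriple out) := by unfold Spec_ArtifCodebook393; infer_instance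

-- ===== CLAIM (what is proved, stated in full; the proofs are below) =====
def Claim_equal_ArtifCodebook393 : Prop := ∀ (ptriple : List Int), Dom_ArtifCodebook393 ptriple → Pre_ArtifCodebook393 ptriple → Spec_ArtifCodebook393 ptriple (ArtifCodebook393 ptriple)

-- ===== LEMMAS AND PROOFS =====

-- scalar form of A's per-element quantizers and of its infN increment
def fA0 (x : Int) : Int := if x ≤ -2 then -2 else if -1 ≤ x ∧ x ≤ 4 then (PySem.Dict.get? pvCoDict0 x).getD 0 else 32
def fA1 (x : Int) : Int := if x ≤ -2 then -2 else if -1 ≤ x ∧ x ≤ 6 then (PySem.Dict.get? pvCoDict1 x).getD 0 else 32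
def fA2 (x : Int) : Int := if x ≤ -2 then -2 else if -1 ≤ x ∧ x ≤ 7 then (PySem.Dict.get? pvCoDict2 x).getD 0 else 32
def iA (x : Int) : Int := if x ≤ -2 then 0 else if -1 ≤ x ∧ x ≤ 4 then 0 else 1

-- scalar form of B's clamp-table lookup
def fB (T : PySem.Dict Int Int) (hi x : Int) : Int := (PySem.Dict.get? T (min (max x (-2)) hi)).getD 0

theorem stepA (p : List Int) (st : List Int × Int) (l : Int) :
    (let x := (PySem.List.pyGet? p l).getD 0
     if x ≤ -2 then (st.1.set l.toNat (-2), st.2)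
     else if -1 ≤ x ∧ x ≤ 4 then (st.1.set l.toNat ((PySem.Dict.get? pvCoDict0 x).getD 0), st.2)
     else (st.1.set l.toNat 32, st.2 + 1))
    = (st.1.set l.toNat (fA0 ((PySem.List.pyGet? p l).getD 0)),
       st.2 + iA ((PySem.List.pyGet? p l).getD 0)) := by
  simp only [fA0, iA]
  split_ifs <;> simp

theorem stepB1 (p : List Int) (nt : List Int) (l : Int) :
    (let x := (PySem.List.pyGet? p l).getD 0
     if x ≤ -2 then nt.set l.toNat (-2)
     else if -1 ≤ x ∧ x ≤ 6 then nt.set l.toNat ((PySem.Dict.get? pvCoDict1 x).getD 0)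
     else nt.set l.toNat 32)
    = nt.set l.toNat (fA1 ((PySem.List.pyGet? p l).getD 0)) := by
  simp only [fA1]
  split_ifs <;> rfl

theorem stepB2 (p : List Int) (nt : List Int) (l : Int) :
    (let x := (PySem.List.pyGet? p l).getD 0
     if x ≤ -2 then nt.set l.toNat (-2)
     else if -1 ≤ x ∧ x ≤ 7 then nt.set l.toNat ((PySem.Dict.get? pvCoDict2 x).getD 0)
     else nt.set l.toNat 32)
    = nt.set l.toNat (fA2 ((PySem.List.pyGet? p l).getD 0)) := by
  simp only [fA2]
  split_ifs <;> rfl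

theorem iA_eq (x : Int) : iA x = if 5 ≤ x then 1 else 0 := by
  simp only [iA]
  split_ifs <;> omega

theorem tab0 (x : Int) : fB pvT0 5 x = fA0 x := by
  by_cases hlo : x ≤ -2
  · have h : min (max x (-2)) 5 = -2 := by omega
    simp only [fB, fA0, h, if_pos hlo]; decide
  · by_cases hhi : 5 ≤ x
    · have h : min (max x (-2)) 5 = 5 := by omega
      simp only [fB, fA0, h]
      rw [if_neg hlo, if_neg (by omega)]; decide
    · have h : min (max x (-2)) 5 = x := by omega
      simp only [fB, fA0, h, if_neg hlo, if_pos (show -1 ≤ x ∧ x ≤ 4 by omega)]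
      interval_cases x <;> decide

theorem tab1 (x : Int) : fB pvT1 7 x = fA1 x := by
  by_cases hlo : x ≤ -2
  · have h : min (max x (-2)) 7 = -2 := by omega
    simp only [fB, fA1, h, if_pos hlo]; decide
  · by_cases hhi : 7 ≤ x
    · have h : min (max x (-2)) 7 = 7 := by omega
      simp only [fB, fA1, h]
      rw [if_neg hlo, if_neg (by omega)]; decide
    · have h : min (max x (-2)) 7 = x := by omega
      simp only [fB, fA1, h, if_neg hlo, if_pos (show -1 ≤ x ∧ x ≤ 6 by omega)]
      interval_cases x <;> decide

theorem tab2 (x : Int) : fB pvT2 8 x = fA2 x := by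
  by_cases hlo : x ≤ -2
  · have h : min (max x (-2)) 8 = -2 := by omega
    simp only [fB, fA2, h, if_pos hlo]; decide
  · by_cases hhi : 8 ≤ x
    · have h : min (max x (-2)) 8 = 8 := by omega
      simp only [fB, fA2, h]
      rw [if_neg hlo, if_neg (by omega)]; decide
    · have h : min (max x (-2)) 8 = x := by omega
      simp only [fB, fA2, h, if_neg hlo, if_pos (show -1 ≤ x ∧ x ≤ 7 by omega)]
      interval_cases x <;> decide

theorem pvGo_three (a b c : Int) (T : PySem.Dict Int Int) (hi : Int) :
    pvGo [a, b, c] T hi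
    = ([fB T hi a, fB T hi b, fB T hi c],
       ((true && decide (fB T hi c = c)) && decide (fB T hi b = b)) && decide (fB T hi a = a)) := rfl

theorem ArtifCodebook393_key (a b c : Int) (rest : List Int) :
    ArtifCodebook393 (a :: b :: c :: rest) = ArtifCodebook393_alt (a :: b :: c :: rest) := by
  have hr : PySem.List.pyRange 0 3 1 = [0, 1, 2] := by decide
  have g0 : PySem.List.pyGet? (a :: b :: c :: rest) 0 = some a := by
    rw [PySem.List.pyGet?_zero_cons]
  have g1 : PySem.List.pyGet? (a :: b :: c :: rest) 1 = some b := by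
    rw [show (1:Int) = ((1:Nat):Int) from rfl, PySem.List.pyGet?_natCast]; rfl
  have g2 : PySem.List.pyGet? (a :: b :: c :: rest) 2 = some c := by
    rw [show (2:Int) = ((2:Nat):Int) from rfl, PySem.List.pyGet?_natCast]; rfl
  have G0 : ∀ (e1 e2 e3 : Int), (PySem.List.pyGet? [e1, e2, e3] 0).getD 0 = e1 := fun _ _ _ => rfl
  have G1 : ∀ (e1 e2 e3 : Int), (PySem.List.pyGet? [e1, e2, e3] 1).getD 0 = e2 := fun _ _ _ => rfl
  have G2 : ∀ (e1 e2 e3 : Int), (PySem.List.pyGet? [e1, e2, e3] 2).getD 0 = e3 := fun _ _ _ => rfl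
  simp only [ArtifCodebook393, ArtifCodebook393_alt, hr, List.foldl, stepA, stepB1, stepB2,
    g0, g1, g2, Option.getD_some,
    show Int.toNat 0 = 0 from rfl, show Int.toNat 1 = 1 from rfl, show Int.toNat 2 = 2 from rfl,
    List.set, zero_add]
  rw [iA_eq, iA_eq, iA_eq]
  have hc : ((List.filter (fun x => decide (5 ≤ x)) [a, b, c]).length : Int)
      = (if 5 ≤ a then 1 else 0) + (if 5 ≤ b then 1 else 0) + (if 5 ≤ c then 1 else 0) := by
    by_cases ha : 5 ≤ a <;> by_cases hb : 5 ≤ b <;> by_cases hc : 5 ≤ c <;>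
      simp [List.filter, ha, hb, hc]
  rw [hc]
  set na : Int := if 5 ≤ a then 1 else 0 with hna
  set nb : Int := if 5 ≤ b then 1 else 0 with hnb
  set nc : Int := if 5 ≤ c then 1 else 0 with hnc
  by_cases h1 : na + nb + nc = 1
  · rw [if_pos h1, if_pos h1]
    simp [pvGo_three, tab1, G0, G1, G2, Prod.mk.injEq, Bool.and_comm, Bool.and_assoc,
      Bool.and_left_comm]
  · by_cases h2 : na + nb + nc = 2
    · rw [if_neg h1, if_neg h1, if_pos h2, if_pos h2]
      simp [pvGo_three, tab2, G0, G1, G2, Prod.mk.injEq, Bool.and_comm, Bool.and_assoc,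
        Bool.and_left_comm]
    · rw [if_neg h1, if_neg h1, if_neg h2, if_neg h2]
      simp [pvGo_three, tab0, G0, G1, G2, Prod.mk.injEq, Bool.and_comm, Bool.and_assoc,
        Bool.and_left_comm]

-- ===== VERDICT (by name: the statement is the Claim_ definition above) =====
theorem ArtifCodebook393_spec : Claim_equal_ArtifCodebook393 := by
  intro ptriple _ hpre
  match ptriple, hpre with
  | a :: b :: c :: rest, _ =>
    show ArtifCodebook393 _ = ArtifCodebook393_alt _
    exact ArtifCodebook393_key a b c rest
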